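-- pv_equiv track=rewrite | github.com/ApantallateMX/mercado-libre-dashboard | app/api/items.py | _get_base_and_type
-- ===== SOURCE A (Python) =====
-- GR_SUFFIXES = ["-NEW", "-GRA", "-GRB", "-GRC"]
--
-- IC_SUFFIXES = ["-ICB", "-ICC"]
--
-- def _get_base_and_type(sku: str):
--     """Retorna (base_sku, 'ic'|'gr') segun el sufijo."""
--     upper = sku.upper()
--     for sfx in IC_SUFFIXES:
--         if upper.endswith(sfx):
--             return sku[:-len(sfx)], "ic"
--     for sfx in GR_SUFFIXES:
--         if upper.endswith(sfx):
--             return sku[:-len(sfx)], "gr"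
--     return sku, "gr"  # sin sufijo = tratar como GR
-- ===== SOURCE B (Python) =====
-- SUFFIX_TYPE = {"ICB": "ic", "ICC": "ic", "NEW": "gr", "GRA": "gr", "GRB": "gr", "GRC": "gr"}
--
-- def _get_base_and_type(sku: str):
--     """Retorna (base_sku, 'ic'|'gr') segun el sufijo."""
--     base, sep, tail = sku.rpartition("-")
--     if sep:
--         t = SUFFIX_TYPE.get(tail.upper())
--         if t is not None:
--             return base, t
--     return sku, "gr"
-- ===== Notes on version B (the rewrite author's own statement) =====
-- stated objective: idiomatic
-- what changed: Replaces A's two endswith loops over hyphenated suffix lists by a single rpartition at the last hyphen plus one dict lookup of the uppercased three-letter tail.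
import Mathlib
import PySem

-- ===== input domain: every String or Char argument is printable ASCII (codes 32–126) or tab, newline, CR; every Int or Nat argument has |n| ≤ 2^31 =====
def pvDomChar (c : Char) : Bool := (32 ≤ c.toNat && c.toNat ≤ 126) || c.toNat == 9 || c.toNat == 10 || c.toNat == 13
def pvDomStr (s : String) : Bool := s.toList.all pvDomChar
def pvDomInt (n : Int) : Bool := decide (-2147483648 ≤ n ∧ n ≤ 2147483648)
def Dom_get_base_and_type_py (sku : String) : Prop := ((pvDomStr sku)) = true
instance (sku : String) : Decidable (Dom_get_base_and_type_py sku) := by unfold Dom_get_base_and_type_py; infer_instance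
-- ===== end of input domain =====

-- B replaces A's two endswith loops by one rpartition at the last hyphen plus a dict lookup of the
-- uppercased tail (more idiomatic; similar cost). Proved equal on every input.

-- ===== PORT A =====
def pvIcSuffixes : List String := ["-ICB", "-ICC"]

def pvGrSuffixes : List String := ["-NEW", "-GRA", "-GRB", "-GRC"]

-- 'for sfx in SUFFIXES: if upper.endswith(sfx): return sku[:-len(sfx)], …' as structural recursion
def pvMatchSuffix (sku upper : String) : List String → Option String
  | [] => none
  | sfx :: rest =>
    if PySem.Str.endswith upper sfx then
      some (PySem.Str.slice sku none (some (-(PySem.Str.len sfx))))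
    else pvMatchSuffix sku upper rest

def get_base_and_type_py (sku : String) : String × String :=
  let upper := PySem.Str.upper sku
  match pvMatchSuffix sku upper pvIcSuffixes with
  | some base => (base, "ic")
  | none =>
    match pvMatchSuffix sku upper pvGrSuffixes with
    | some base => (base, "gr")
    | none => (sku, "gr")

-- ===== PORT B =====
def pvSuffixType : PySem.Dict String String :=
  PySem.Dict.ofList [("ICB", "ic"), ("ICC", "ic"), ("NEW", "gr"), ("GRA", "gr"), ("GRB", "gr"), ("GRC", "gr")]

-- hand port of sku.rpartition("-") (exact for this 1-char separator): split at the LAST '-',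
-- found by scanning the reversed character list
def pvRPartitionDash (sku : String) : String × String × String :=
  let rs := sku.toList.reverse
  match rs.dropWhile (fun c => c != '-') with
  | [] => ("", "", sku)
  | _ :: before =>
    (String.ofList before.reverse, "-", String.ofList ((rs.takeWhile (fun c => c != '-')).reverse))

def get_base_and_type_py_alt (sku : String) : String × String :=
  match pvRPartitionDash sku with
  | (base, sep, tail) =>
    if sep = "" then (sku, "gr")
    else
      match pvSuffixType.get? (PySem.Str.upper tail) with
      | some t => (base, t)
      | none => (sku, "gr")

-- ===== PRECONDITION & SPEC =====
def Spec_get_base_and_type_py (sku : String) (out : String × String) : Prop := out = get_base_and_type_py_alt sku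
instance (sku : String) (out : String × String) : Decidable (Spec_get_base_and_type_py sku out) := by unfold Spec_get_base_and_type_py; infer_instance

-- ===== CLAIM (what is proved, stated in full; the proofs are below) =====
def Claim_equal_get_base_and_type_py : Prop := ∀ (sku : String), Dom_get_base_and_type_py sku → Spec_get_base_and_type_py sku (get_base_and_type_py sku)

-- ===== LEMMAS AND PROOFS =====

theorem pv_upperChar_dash (c : Char) : PySem.Chars.upperChar c = '-' ↔ c = '-' := by
  unfold PySem.Chars.upperChar PySem.Chars.islower
  have h45 : ('-' : Char).toNat = 45 := by decide
  split
  · rename_i h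
    simp only [Bool.and_eq_true, decide_eq_true_eq, Char.le_def, UInt32.le_iff_toNat_le] at h
    have h1 : 97 ≤ c.toNat := h.1
    have h2 : c.toNat ≤ 122 := h.2
    constructor
    · intro he
      exfalso
      have hts : (Char.ofNat (c.toNat - 32)).toNat = ('-' : Char).toNat := by rw [he]
      rw [Char.toNat_ofNat, if_pos (by constructor; omega)] at hts
      omega
    · intro he
      exfalso
      subst he
      omega
  · simp

-- if u ++ '-'::w₁ is a prefix of v ++ '-'::w₂ and neither u nor v contains '-', then u = v
theorem pv_prefix_dash (u : List Char) : ∀ (v w₁ w₂ : List Char), '-' ∉ u → '-' ∉ v →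
    (u ++ '-' :: w₁) <+: (v ++ '-' :: w₂) → u = v := by
  induction u with
  | nil =>
    intro v w₁ w₂ _ hv hp
    cases v with
    | nil => rfl
    | cons x v' =>
      exfalso
      rcases hp with ⟨r, hr⟩
      simp only [List.nil_append, List.cons_append] at hr
      have : '-' = x := by exact (List.cons.injEq _ _ _ _).mp hr |>.1
      exact hv (by simp [← this])
  | cons a u' ih =>
    intro v w₁ w₂ hu hv hp
    cases v with
    | nil =>
      exfalso
      rcases hp with ⟨r, hr⟩
      simp only [List.cons_append, List.nil_append] at hr
      have : a = '-' := (List.cons.injEq _ _ _ _).mp hr |>.1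
      exact hu (by simp [this])
    | cons x v' =>
      rcases hp with ⟨r, hr⟩
      simp only [List.cons_append] at hr
      obtain ⟨hax, hrest⟩ := (List.cons.injEq _ _ _ _).mp hr
      have : u' = v' := by
        refine ih v' w₁ w₂ (fun h => hu (List.mem_cons_of_mem _ h)) (fun h => hv (List.mem_cons_of_mem _ h)) ⟨r, ?_⟩
        simpa using hrest
      simp [hax, this]

-- no '-' in the string ⇒ the endswith test for a '-'-led suffix fails
theorem pv_endswith_no_dash (cs P : List Char) (h : '-' ∉ cs) :
    PySem.Chars.endswith (PySem.Chars.upper cs) ('-' :: P) = false := by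
  by_contra hc
  have htrue : PySem.Chars.endswith (PySem.Chars.upper cs) ('-' :: P) = true := by
    cases hb : PySem.Chars.endswith (PySem.Chars.upper cs) ('-' :: P) <;> simp_all
  rw [PySem.Chars.endswith_iff] at htrue
  have hmem : '-' ∈ PySem.Chars.upper cs := htrue.mem (by simp)
  unfold PySem.Chars.upper at hmem
  rcases List.mem_map.mp hmem with ⟨x, hx, hux⟩
  exact h (((pv_upperChar_dash x).mp hux) ▸ hx)

-- the central characterisation: with rs = reverse cs split as t ++ '-'::before ('-' ∉ t),
-- upper(cs).endswith('-'::P) ⟺ the uppercased tail (t reversed) is exactly P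
theorem pv_endswith_iff (t before P : List Char) (hmemt : ∀ x ∈ t, x ≠ '-') (hP : '-' ∉ P) :
    PySem.Chars.endswith (PySem.Chars.upper (t ++ '-' :: before).reverse) ('-' :: P) = true ↔
      (t.map PySem.Chars.upperChar).reverse = P := by
  have hndt : '-' ∉ t.map PySem.Chars.upperChar := by
    intro h
    rcases List.mem_map.mp h with ⟨x, hx, hux⟩
    exact hmemt x hx ((pv_upperChar_dash x).mp hux)
  have hupperrev : (PySem.Chars.upper (t ++ '-' :: before).reverse).reverse =
      t.map PySem.Chars.upperChar ++ '-' :: before.map PySem.Chars.upperChar := by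
    unfold PySem.Chars.upper
    simp [List.map_reverse, pv_upperChar_dash]
  rw [PySem.Chars.endswith_iff, ← List.reverse_prefix, hupperrev]
  constructor
  · intro hp
    have hrev : ('-' :: P).reverse = P.reverse ++ '-' :: [] := by simp
    rw [hrev] at hp
    have := pv_prefix_dash P.reverse (t.map PySem.Chars.upperChar) [] (before.map PySem.Chars.upperChar)
      (by simpa using hP) hndt hp
    rw [← this]
    simp
  · intro he
    have ht : t.map PySem.Chars.upperChar = P.reverse := by
      rw [← he]; simp
    rw [ht]
    refine ⟨before.map PySem.Chars.upperChar, ?_⟩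
    simp

-- bridge: Str.endswith on the uppercased string, in Chars terms
theorem pv_endsw_bridge (sku p : String) :
    PySem.Str.endswith (PySem.Str.upper sku) p = PySem.Chars.endswith (PySem.Chars.upper sku.toList) p.toList := by
  unfold PySem.Str.endswith PySem.Str.upper
  rw [String.toList_ofList]

-- both ports agree on every string
theorem pv_ports_eq (sku : String) : get_base_and_type_py sku = get_base_and_type_py_alt sku := by
  unfold get_base_and_type_py get_base_and_type_py_alt pvRPartitionDash pvMatchSuffix pvIcSuffixes pvGrSuffixes
  simp only [pv_endsw_bridge, pvMatchSuffix]
  cases hdw : sku.toList.reverse.dropWhile (fun c => c != '-') with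
  | nil =>
    have hnod : '-' ∉ sku.toList := by
      intro hm
      have := List.dropWhile_eq_nil_iff.mp hdw '-' (List.mem_reverse.mpr hm)
      simp at this
    simp [pv_endswith_no_dash _ _ hnod, show ("-ICB":String).toList = '-'::"ICB".toList from by decide,
      show ("-ICC":String).toList = '-'::"ICC".toList from by decide,
      show ("-NEW":String).toList = '-'::"NEW".toList from by decide,
      show ("-GRA":String).toList = '-'::"GRA".toList from by decide,
      show ("-GRB":String).toList = '-'::"GRB".toList from by decide,
      show ("-GRC":String).toList = '-'::"GRC".toList from by decide]
  | cons d before =>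
    have hd : d = '-' := by
      have hne : sku.toList.reverse.dropWhile (fun c => c != '-') ≠ [] := by rw [hdw]; simp
      have h1 := List.head_dropWhile_not (fun c => c != '-') hne
      have h2 : (sku.toList.reverse.dropWhile (fun c => c != '-')).head hne = d := by simp [hdw]
      rw [h2] at h1
      simpa using h1
    subst hd
    have hmemt : ∀ x ∈ sku.toList.reverse.takeWhile (fun c => c != '-'), x ≠ '-' := by
      intro x hx
      simpa using List.mem_takeWhile_imp hx
    have hsplit : sku.toList.reverse = sku.toList.reverse.takeWhile (fun c => c != '-') ++ '-' :: before := by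
      conv_lhs => rw [← List.takeWhile_append_dropWhile (p := fun c => c != '-') (l := sku.toList.reverse)]
      rw [hdw]
    set t := sku.toList.reverse.takeWhile (fun c => c != '-') with ht
    have hcs : sku.toList = (t ++ '-' :: before).reverse := by
      rw [← hsplit]; simp
    have eP : ∀ (P : List Char), '-' ∉ P →
        PySem.Chars.endswith (PySem.Chars.upper sku.toList) ('-' :: P)
          = decide ((t.map PySem.Chars.upperChar).reverse = P) := by
      intro P hP
      rw [hcs, Bool.eq_iff_iff, pv_endswith_iff t before P hmemt hP, decide_eq_true_iff]
    have hkey : PySem.Str.upper (String.ofList t.reverse) = String.ofList ((t.map PySem.Chars.upperChar).reverse) := by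
      unfold PySem.Str.upper PySem.Chars.upper
      rw [String.toList_ofList, List.map_reverse]
    have hbase : (sku.toList.reverse.takeWhile (fun c => c != '-')).length = 3 →
        PySem.Str.slice sku none (some (-(4 : Int))) = String.ofList before.reverse := by
      intro h3
      rw [← ht] at h3
      unfold PySem.Str.slice
      rw [PySem.Chars.slice_eq_listSlice, PySem.List.slice_to_neg_ofNat sku.toList 4 (by omega), hcs]
      rw [show (t ++ '-' :: before).reverse = before.reverse ++ '-' :: t.reverse from by simp]
      have hn : (before.reverse ++ '-' :: t.reverse).length - 4 = before.reverse.length := by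
        simp [h3]
      rw [hn, List.take_left]
    set K := (t.map PySem.Chars.upperChar).reverse with hKdef
    have hsbeq : ∀ (s : String), (s == String.ofList K) = decide (K = s.toList) := by
      intro s
      rw [Bool.eq_iff_iff, beq_iff_eq, decide_eq_true_iff]
      constructor
      · intro h; rw [h, String.toList_ofList]
      · intro h; rw [h, String.ofList_toList]
    have e1 : PySem.Chars.endswith (PySem.Chars.upper sku.toList) ("-ICB":String).toList = decide (K = ['I','C','B']) := by
      rw [show ("-ICB":String).toList = '-' :: ("ICB":String).toList from by decide]
      exact eP _ (by decide)
    have e2 : PySem.Chars.endswith (PySem.Chars.upper sku.toList) ("-ICC":String).toList = decide (K = ['I','C','C']) := by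
      rw [show ("-ICC":String).toList = '-' :: ("ICC":String).toList from by decide]
      exact eP _ (by decide)
    have e3 : PySem.Chars.endswith (PySem.Chars.upper sku.toList) ("-NEW":String).toList = decide (K = ['N','E','W']) := by
      rw [show ("-NEW":String).toList = '-' :: ("NEW":String).toList from by decide]
      exact eP _ (by decide)
    have e4 : PySem.Chars.endswith (PySem.Chars.upper sku.toList) ("-GRA":String).toList = decide (K = ['G','R','A']) := by
      rw [show ("-GRA":String).toList = '-' :: ("GRA":String).toList from by decide]
      exact eP _ (by decide)
    have e5 : PySem.Chars.endswith (PySem.Chars.upper sku.toList) ("-GRB":String).toList = decide (K = ['G','R','B']) := by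
      rw [show ("-GRB":String).toList = '-' :: ("GRB":String).toList from by decide]
      exact eP _ (by decide)
    have e6 : PySem.Chars.endswith (PySem.Chars.upper sku.toList) ("-GRC":String).toList = decide (K = ['G','R','C']) := by
      rw [show ("-GRC":String).toList = '-' :: ("GRC":String).toList from by decide]
      exact eP _ (by decide)
    rw [e1, e2, e3, e4, e5, e6, hkey]
    have hdict : pvSuffixType = PySem.Dict.mk [("ICB", "ic"), ("ICC", "ic"), ("NEW", "gr"), ("GRA", "gr"), ("GRB", "gr"), ("GRC", "gr")] := by decide
    rw [hdict]
    simp only [PySem.Dict.get?_mk_cons, hsbeq]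
    by_cases hK1 : K = ['I','C','B']
    · have h3 : (sku.toList.reverse.takeWhile (fun c => c != '-')).length = 3 := by
        have := congrArg List.length hK1
        rw [hKdef] at this
        simpa [← ht] using this
      simp [hK1, hbase h3]
    by_cases hK2 : K = ['I','C','C']
    · have h3 : (sku.toList.reverse.takeWhile (fun c => c != '-')).length = 3 := by
        have := congrArg List.length hK2
        rw [hKdef] at this
        simpa [← ht] using this
      simp [hK2, hbase h3]
    by_cases hK3 : K = ['N','E','W']
    · have h3 : (sku.toList.reverse.takeWhile (fun c => c != '-')).length = 3 := by
        have := congrArg List.length hK3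
        rw [hKdef] at this
        simpa [← ht] using this
      simp [hK3, hbase h3]
    by_cases hK4 : K = ['G','R','A']
    · have h3 : (sku.toList.reverse.takeWhile (fun c => c != '-')).length = 3 := by
        have := congrArg List.length hK4
        rw [hKdef] at this
        simpa [← ht] using this
      simp [hK4, hbase h3]
    by_cases hK5 : K = ['G','R','B']
    · have h3 : (sku.toList.reverse.takeWhile (fun c => c != '-')).length = 3 := by
        have := congrArg List.length hK5
        rw [hKdef] at this
        simpa [← ht] using this
      simp [hK5, hbase h3]
    by_cases hK6 : K = ['G','R','C']
    · have h3 : (sku.toList.reverse.takeWhile (fun c => c != '-')).length = 3 := by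
        have := congrArg List.length hK6
        rw [hKdef] at this
        simpa [← ht] using this
      simp [hK6, hbase h3]
    simp [hK1, hK2, hK3, hK4, hK5, hK6, PySem.Dict.get?]


-- ===== VERDICT (by name: the statement is the Claim_ definition above) =====
theorem get_base_and_type_py_spec : Claim_equal_get_base_and_type_py := by
  intro sku _
  unfold Spec_get_base_and_type_py
  exact pv_ports_eq sku
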